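-- pv_equiv track=rewrite | github.com/jfr992/openclaw-sentinel | dashboard/baseline.py | _check_network_anomaly
-- ===== SOURCE A (Python) =====
-- from typing import Dict, List, Optional
--
-- def _check_network_anomaly(details: Dict, windows: List[Dict]) -> Optional[str]:
--     """Check if network destination is unusual."""
--     remote = details.get('remote', '')
--     if not remote or remote == '-':
--         return None
--
--     # Build set of known destinations
--     known_remotes = set()
--     for w in windows:
--         known_remotes.update(w.get('network', {}).keys())
--
--     # Check for new external IPs (not localhost/LAN)
--     if remote not in known_remotes:
--         # Skip localhost and common LAN ranges
--         if not any(x in remote for x in ['127.0.0.1', '::1', '192.168.', '10.0.', '172.16.']):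
--             return f"New network destination: {remote}"
--
--     return None
-- ===== SOURCE B (Python) =====
-- from typing import Dict, List, Optional
--
-- def _scan_windows(remote: str, windows: List[Dict]) -> Optional[str]:
--     """Recursively walk the windows; stop at the first one already knowing remote."""
--     if not windows:
--         return f"New network destination: {remote}"
--     if remote in windows[0].get('network', {}):
--         return None
--     return _scan_windows(remote, windows[1:])
--
-- def _check_network_anomaly(details: Dict, windows: List[Dict]) -> Optional[str]:
--     """Check if network destination is unusual (prefix guard first, then a recursive scan)."""
--     remote = details.get('remote', '')
--     if not remote or remote == '-':
--         return None
--     # Dismiss localhost / LAN destinations up front, before looking at any window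
--     if any(x in remote for x in ['127.0.0.1', '::1', '192.168.', '10.0.', '172.16.']):
--         return None
--     return _scan_windows(remote, windows)
-- ===== Notes on version B (the rewrite author's own statement) =====
-- stated objective: alternative
-- what changed: A builds a known_remotes set from all windows and then tests membership and the LAN-prefix guard; B inverts the control flow: it dismisses localhost/LAN remotes up front and then recursively descends the windows list, returning None at the first window whose network dict contains the remote and the anomaly message only when the recursion exhausts the list, so no set is ever materialised.
import Mathlib
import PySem

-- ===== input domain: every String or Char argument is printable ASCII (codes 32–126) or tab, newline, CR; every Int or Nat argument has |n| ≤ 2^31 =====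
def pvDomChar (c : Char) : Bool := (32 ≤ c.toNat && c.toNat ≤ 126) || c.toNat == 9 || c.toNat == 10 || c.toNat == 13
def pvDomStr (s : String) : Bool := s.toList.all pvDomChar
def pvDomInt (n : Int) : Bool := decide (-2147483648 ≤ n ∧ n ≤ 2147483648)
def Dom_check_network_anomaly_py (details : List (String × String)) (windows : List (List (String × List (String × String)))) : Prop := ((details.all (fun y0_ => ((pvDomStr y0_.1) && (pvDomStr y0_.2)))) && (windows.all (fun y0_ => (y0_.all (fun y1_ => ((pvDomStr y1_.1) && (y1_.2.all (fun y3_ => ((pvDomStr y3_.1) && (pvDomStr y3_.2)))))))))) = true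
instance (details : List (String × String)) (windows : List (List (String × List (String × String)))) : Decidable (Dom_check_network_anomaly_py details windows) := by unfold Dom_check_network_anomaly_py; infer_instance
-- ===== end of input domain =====

-- B inverts A's control flow: the LAN-prefix guard is checked first and the windows list is
-- walked recursively with early exit, so A's known_remotes set is never built (objective: alternative).

-- ===== PORT A =====
def check_network_anomaly_py (details : List (String × String)) (windows : List (List (String × List (String × String)))) : Option String :=
  let remote := PySem.Dict.getD (PySem.Dict.mk details) "remote" ""
  if remote = "" ∨ remote = "-" then none
  else
    -- known_remotes built by the loop: set().update(w.get('network', {}).keys()) per window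
    let known_remotes : PySem.Set String :=
      windows.foldl
        (fun s w => PySem.Set.update s (PySem.Dict.keys (PySem.Dict.mk (PySem.Dict.getD (PySem.Dict.mk w) "network" []))))
        PySem.Set.empty
    if ¬ (PySem.Set.contains known_remotes remote) then
      if ¬ (["127.0.0.1", "::1", "192.168.", "10.0.", "172.16."].any (fun x => PySem.Str.isIn x remote)) then
        some ("New network destination: " ++ remote)
      else none
    else none

-- ===== PORT B =====
-- _scan_windows: recursion over the windows list, early None at the first window knowing remote
def pvScanWindows (remote : String) : List (List (String × List (String × String))) → Option String
  | [] => some ("New network destination: " ++ remote)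
  | w :: ws =>
    if PySem.Dict.contains (PySem.Dict.mk (PySem.Dict.getD (PySem.Dict.mk w) "network" [])) remote then none
    else pvScanWindows remote ws

def check_network_anomaly_py_alt (details : List (String × String)) (windows : List (List (String × List (String × String)))) : Option String :=
  let remote := PySem.Dict.getD (PySem.Dict.mk details) "remote" ""
  if remote = "" ∨ remote = "-" then none
  else if ["127.0.0.1", "::1", "192.168.", "10.0.", "172.16."].any (fun x => PySem.Str.isIn x remote) then none
  else pvScanWindows remote windows

-- ===== PRECONDITION & SPEC =====
def Spec_check_network_anomaly_py (details : List (String × String)) (windows : List (List (String × List (String × String)))) (out : Option String) : Prop := out = check_network_anomaly_py_alt details windows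
instance (details : List (String × String)) (windows : List (List (String × List (String × String)))) (out : Option String) : Decidable (Spec_check_network_anomaly_py details windows out) := by unfold Spec_check_network_anomaly_py; infer_instance

-- ===== CLAIM (what is proved, stated in full; the proofs are below) =====
def Claim_equal_check_network_anomaly_py : Prop := ∀ (details : List (String × String)) (windows : List (List (String × List (String × String)))), Dom_check_network_anomaly_py details windows → Spec_check_network_anomaly_py details windows (check_network_anomaly_py details windows)

-- ===== LEMMAS AND PROOFS =====

-- A's accumulated set contains `remote` iff some window's network dict has it as a key.
theorem pv_known_contains (remote : String) (windows : List (List (String × List (String × String)))) (s : PySem.Set String) :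
    PySem.Set.contains
      (windows.foldl
        (fun s w => PySem.Set.update s (PySem.Dict.keys (PySem.Dict.mk (PySem.Dict.getD (PySem.Dict.mk w) "network" []))))
        s) remote
    = (PySem.Set.contains s remote ||
       windows.any (fun w => PySem.Dict.contains (PySem.Dict.mk (PySem.Dict.getD (PySem.Dict.mk w) "network" [])) remote)) := by
  induction windows generalizing s with
  | nil => simp
  | cons w ws ih =>
    simp only [List.foldl_cons, List.any_cons, ih]
    rw [Bool.eq_iff_iff]
    simp only [Bool.or_eq_true, PySem.Set.contains_iff, PySem.Set.mem_update,
      PySem.Dict.contains_iff_mem_keys]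
    tauto

-- B's recursive scan, characterised by the same `any` predicate.
theorem pv_scan_eq (remote : String) (windows : List (List (String × List (String × String)))) :
    pvScanWindows remote windows
    = (if windows.any (fun w => PySem.Dict.contains (PySem.Dict.mk (PySem.Dict.getD (PySem.Dict.mk w) "network" [])) remote)
       then none else some ("New network destination: " ++ remote)) := by
  induction windows with
  | nil => simp [pvScanWindows]
  | cons w ws ih =>
    rw [pvScanWindows, List.any_cons]
    cases h : PySem.Dict.contains (PySem.Dict.mk (PySem.Dict.getD (PySem.Dict.mk w) "network" [])) remote
    · rw [if_neg Bool.false_ne_true, Bool.false_or, ih]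
    · rw [if_pos rfl, Bool.true_or, if_pos rfl]

-- ===== VERDICT (by name: the statement is the Claim_ definition above) =====
theorem check_network_anomaly_py_spec : Claim_equal_check_network_anomaly_py := by
  intro details windows _
  unfold Spec_check_network_anomaly_py check_network_anomaly_py check_network_anomaly_py_alt
  set remote := PySem.Dict.getD (PySem.Dict.mk details) "remote" "" with hr
  by_cases h0 : remote = "" ∨ remote = "-"
  · simp [h0]
  · simp only [h0, if_false]
    rw [pv_known_contains, pv_scan_eq]
    have he : PySem.Set.contains PySem.Set.empty remote = false := rfl
    rw [he, Bool.false_or]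
    generalize (windows.any fun w => PySem.Dict.contains (PySem.Dict.mk (PySem.Dict.getD (PySem.Dict.mk w) "network" [])) remote) = b1
    generalize (["127.0.0.1", "::1", "192.168.", "10.0.", "172.16."].any fun x => PySem.Str.isIn x remote) = b2
    cases b1 <;> cases b2 <;> simp
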